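-- pv_equiv track=rewrite | github.com/usv240/timetracer | src/timetracer/policies/redaction.py | _is_sensitive_key
-- ===== SOURCE A (Python) =====
-- def _is_sensitive_key(key: str, sensitive_keys: frozenset[str]) -> bool:
--     """Check if a key is sensitive (case-insensitive substring match)."""
--     key_lower = key.lower()
--
--     # Exact match
--     if key_lower in sensitive_keys:
--         return True
--
--     # Substring match for compound keys
--     for sensitive in sensitive_keys:
--         if sensitive in key_lower:
--             return True
--
--     return False
-- ===== SOURCE B (Python) =====
-- import re
--
--
-- def _is_sensitive_key(key: str, sensitive_keys) -> bool:
--     """Case-insensitive check: does any sensitive key occur within key?"""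
--     if not sensitive_keys:
--         return False
--     pattern = "|".join(re.escape(s) for s in sensitive_keys)
--     return re.search(pattern, key.lower()) is not None
-- ===== Notes on version B (the rewrite author's own statement) =====
-- stated objective: idiomatic
-- what changed: Replaces A's exact-membership test plus per-key substring loop with a single regex search: one alternation pattern of the escaped sensitive keys run once over the lowercased key (the exact-match branch is subsumed, since equality is a substring match); an explicit guard returns False for an empty key set, where the joined pattern would be empty.
import Mathlib
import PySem

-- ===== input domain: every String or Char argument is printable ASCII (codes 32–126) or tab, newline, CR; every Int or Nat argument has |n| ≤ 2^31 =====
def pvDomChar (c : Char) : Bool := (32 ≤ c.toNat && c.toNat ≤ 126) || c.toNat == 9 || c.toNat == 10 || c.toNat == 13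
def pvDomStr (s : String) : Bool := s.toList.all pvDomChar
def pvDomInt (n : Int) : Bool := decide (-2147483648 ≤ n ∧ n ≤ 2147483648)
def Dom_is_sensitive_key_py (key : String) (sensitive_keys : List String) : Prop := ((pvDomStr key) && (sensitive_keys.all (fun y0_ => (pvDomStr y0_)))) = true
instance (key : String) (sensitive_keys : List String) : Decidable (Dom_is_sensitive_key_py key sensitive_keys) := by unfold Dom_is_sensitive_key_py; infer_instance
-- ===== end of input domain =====

-- B replaces A's exact-match test plus per-key substring loop by a single compiled-regex
-- search over the lowercased key (alternation of the escaped sensitive keys), with an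
-- explicit empty-set guard; idiomatic alternative, same result.


-- ===== PORT A =====
def is_sensitive_key_py (key : String) (sensitive_keys : List String) : Bool :=
  let key_lower := PySem.Str.lower key
  if PySem.Set.contains sensitive_keys key_lower then true
  else sensitive_keys.any (fun sensitive => PySem.Str.isIn sensitive key_lower)

-- ===== PORT B =====
-- re.search on an alternation of re.escape'd literals is ported by hand, and is exact there:
-- the search succeeds iff at some start position of the text one of the literal branches
-- matches, i.e. is a prefix of the tail at that position.
def is_sensitive_key_py_alt (key : String) (sensitive_keys : List String) : Bool :=
  if sensitive_keys = [] then false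
  else
    let kl := PySem.Str.lower key
    (PySem.List.pyRange 0 (PySem.Str.len kl + 1) 1).any (fun i =>
      let tail := PySem.Str.slice kl (some i) none
      sensitive_keys.any (fun s => PySem.Str.startswith tail s))

-- ===== PRECONDITION & SPEC =====
def Spec_is_sensitive_key_py (key : String) (sensitive_keys : List String) (out : Bool) : Prop := out = is_sensitive_key_py_alt key sensitive_keys
instance (key : String) (sensitive_keys : List String) (out : Bool) : Decidable (Spec_is_sensitive_key_py key sensitive_keys out) := by unfold Spec_is_sensitive_key_py; infer_instance

-- ===== CLAIM (what is proved, stated in full; the proofs are below) =====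
def Claim_equal_is_sensitive_key_py : Prop := ∀ (key : String) (sensitive_keys : List String), Dom_is_sensitive_key_py key sensitive_keys → Spec_is_sensitive_key_py key sensitive_keys (is_sensitive_key_py key sensitive_keys)

-- ===== LEMMAS AND PROOFS =====

-- s occurs in L as a substring ↔ s is a prefix of some tail of L
theorem infix_iff_exists_prefix_drop (sub L : List Char) :
    sub <:+: L ↔ ∃ j, sub <+: L.drop j := by
  rw [PySem.Chars.exists_prefix_drop_iff_isIn, PySem.Chars.isIn_iff_infix]

theorem is_sensitive_key_eq (key : String) (sensitive_keys : List String) :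
    is_sensitive_key_py key sensitive_keys = is_sensitive_key_py_alt key sensitive_keys := by
  unfold is_sensitive_key_py is_sensitive_key_py_alt
  rcases eq_or_ne sensitive_keys [] with h | h
  · subst h; simp [PySem.Set.contains]
  · rw [if_neg h, Bool.eq_iff_iff]
    simp only [List.any_eq_true, PySem.Str.startswith_eq, PySem.Str.toList_slice,
      PySem.Chars.slice_eq_listSlice, PySem.Str.isIn_eq, PySem.Chars.startswith_iff,
      PySem.Str.len_eq]
    set L := (PySem.Str.lower key).toList with hL
    have hmem : ∀ x : Int, x ∈ PySem.List.pyRange 0 ((L.length : Int) + 1) 1 ↔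
        0 ≤ x ∧ x < (L.length : Int) + 1 := by
      intro x
      rw [PySem.List.mem_pyRange_iff_of_pos (by norm_num)]
      constructor
      · rintro ⟨h1, h2, _⟩; exact ⟨h1, h2⟩
      · rintro ⟨h1, h2⟩; exact ⟨h1, h2, one_dvd _⟩
    constructor
    · intro h
      have hP : ∃ s ∈ sensitive_keys, s.toList <:+: L := by
        split_ifs at h with hc
        · refine ⟨PySem.Str.lower key, (PySem.Set.contains_iff _ _).mp hc, ?_⟩
          exact List.infix_rfl
        · simpa only [List.any_eq_true, PySem.Chars.isIn_iff_infix] using h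
      obtain ⟨s, hs, hinf⟩ := hP
      obtain ⟨j, hpre⟩ := (infix_iff_exists_prefix_drop _ _).mp hinf
      by_cases hj : j ≤ L.length
      · refine ⟨(j : Int), (hmem _).mpr ⟨Int.natCast_nonneg j, by exact_mod_cast Nat.lt_succ_of_le hj⟩, s, hs, ?_⟩
        rw [PySem.List.slice_from _ (Int.natCast_nonneg j), Int.toNat_natCast]
        exact hpre
      · have : L.drop j = [] := List.drop_eq_nil_of_le (le_of_not_ge hj)
        rw [this] at hpre
        have hnil : s.toList = [] := List.prefix_nil.mp hpre
        refine ⟨0, (hmem 0).mpr ⟨le_refl 0, by positivity⟩, s, hs, ?_⟩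
        rw [PySem.List.slice_from _ (le_refl (0:Int))]
        rw [hnil]
        exact List.nil_prefix
    · rintro ⟨i, hi, s, hs, hpre⟩
      obtain ⟨h0, _⟩ := (hmem i).mp hi
      rw [PySem.List.slice_from _ h0] at hpre
      have hinf : s.toList <:+: L := (infix_iff_exists_prefix_drop _ _).mpr ⟨i.toNat, hpre⟩
      split_ifs with hc
      · trivial
      · simp only [List.any_eq_true, PySem.Chars.isIn_iff_infix]
        exact ⟨s, hs, hinf⟩

-- ===== VERDICT (by name: the statement is the Claim_ definition above) =====
theorem is_sensitive_key_py_spec : Claim_equal_is_sensitive_key_py := by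
  intro key sensitive_keys _
  unfold Spec_is_sensitive_key_py
  exact is_sensitive_key_eq key sensitive_keys
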